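-- pv_equiv track=rewrite | github.com/Ghabs95/nexus | src/runtime/agent_monitor.py | detect_workflow_tier
-- ===== SOURCE A (Python) =====
-- from typing import Optional, Tuple
--
-- def detect_workflow_tier(labels: list) -> Optional[str]:
--     """
--     Detect workflow tier from issue labels.
--
--     Label mappings:
--     - workflow:* → use explicit tier
--     - priority:critical → fast-track (quick fixes)
--     - bug → shortened (bug fix)
--     - feature, enhancement → full (new feature)
--
--     Returns: "full", "shortened", "fast-track", or None
--     """
--     # Check for explicit workflow labels
--     for label in labels:
--         if label == "workflow:full":
--             return "full"
--         elif label == "workflow:shortened":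
--             return "shortened"
--         elif label == "workflow:fast-track":
--             return "fast-track"
--
--     # Auto-detect based on other labels
--     labels_lower = [l.lower() for l in labels]
--
--     if any("critical" in l or "hotfix" in l or "urgent" in l for l in labels_lower):
--         return "fast-track"
--     elif any("bug" in l or "fix" in l for l in labels_lower):
--         return "shortened"
--     elif any(
--         "feature" in l or "enhancement" in l or "improvement" in l
--         for l in labels_lower
--     ):
--         return "full"
--
--     # Default to full for unclassified
--     return "full"
-- ===== SOURCE B (Python) =====
-- _EXPLICIT = {
--     "workflow:full": "full",
--     "workflow:shortened": "shortened",
--     "workflow:fast-track": "fast-track",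
-- }
--
-- def detect_workflow_tier(labels: list):
--     # Phase 1: first explicit workflow:* label in document order, via table lookup
--     for label in labels:
--         tier = _EXPLICIT.get(label)
--         if tier is not None:
--             return tier
--     # Phase 2: one pass tracking the highest-priority matching category
--     saw_fast = False
--     saw_short = False
--     for label in labels:
--         ll = label.lower()
--         if "critical" in ll or "hotfix" in ll or "urgent" in ll:
--             saw_fast = True
--         elif "bug" in ll or "fix" in ll:
--             saw_short = True
--     if saw_fast:
--         return "fast-track"
--     if saw_short:
--         return "shortened"
--     return "full"
-- ===== Notes on version B (the rewrite author's own statement) =====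
-- stated objective: alternative
-- what changed: Phase 1 becomes a table lookup in an explicit-tier dict instead of an if/elif chain, and Phase 2's three separate any()-scans over the lowercased labels are replaced by a single pass that tracks saw_fast/saw_short flags and decides by priority afterwards (the redundant feature/enhancement branch, which also returns 'full', disappears).
import Mathlib
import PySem

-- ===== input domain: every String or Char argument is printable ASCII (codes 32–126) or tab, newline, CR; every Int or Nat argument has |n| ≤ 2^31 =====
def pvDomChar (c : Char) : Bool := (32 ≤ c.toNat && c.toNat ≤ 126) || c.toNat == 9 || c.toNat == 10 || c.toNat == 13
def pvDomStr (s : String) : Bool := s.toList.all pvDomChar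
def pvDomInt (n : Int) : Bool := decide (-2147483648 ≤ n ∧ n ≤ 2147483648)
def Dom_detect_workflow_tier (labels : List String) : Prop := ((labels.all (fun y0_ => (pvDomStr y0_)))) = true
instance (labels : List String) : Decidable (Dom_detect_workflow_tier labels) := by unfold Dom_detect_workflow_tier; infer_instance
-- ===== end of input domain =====

-- B replaces Phase 1's if/elif chain by a dict lookup and merges Phase 2's three any()-scans
-- into one flag-tracking pass (dropping the redundant feature branch, which also returns "full").

-- shared substring predicates (the membership tests both Pythons perform)
def dwtCrit (l : String) : Bool :=
  PySem.Str.isIn "critical" l || PySem.Str.isIn "hotfix" l || PySem.Str.isIn "urgent" l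
def dwtBug (l : String) : Bool :=
  PySem.Str.isIn "bug" l || PySem.Str.isIn "fix" l
def dwtFeat (l : String) : Bool :=
  PySem.Str.isIn "feature" l || PySem.Str.isIn "enhancement" l || PySem.Str.isIn "improvement" l

-- ===== PORT A =====
-- the phase-1 for-loop with early returns
def dwtPhase1 : List String → Option String
  | [] => none
  | label :: rest =>
    if label == "workflow:full" then some "full"
    else if label == "workflow:shortened" then some "shortened"
    else if label == "workflow:fast-track" then some "fast-track"
    else dwtPhase1 rest

def detect_workflow_tier (labels : List String) : Option String :=
  match dwtPhase1 labels with
  | some t => some t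
  | none =>
    let labels_lower := labels.map PySem.Str.lower
    if labels_lower.any (fun l => dwtCrit l) then some "fast-track"
    else if labels_lower.any (fun l => dwtBug l) then some "shortened"
    else if labels_lower.any (fun l => dwtFeat l) then some "full"
    else some "full"

-- ===== PORT B =====
def dwtExplicit : PySem.Dict String String :=
  PySem.Dict.ofList
    [("workflow:full", "full"), ("workflow:shortened", "shortened"),
     ("workflow:fast-track", "fast-track")]

-- the phase-1 for-loop over dict lookups with early return
def dwtLookup : List String → Option String
  | [] => none
  | label :: rest =>
    match dwtExplicit.get? label with
    | some tier => some tier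
    | none => dwtLookup rest

-- the single-pass flag update: (saw_fast, saw_short)
def dwtStep (st : Bool × Bool) (label : String) : Bool × Bool :=
  let ll := PySem.Str.lower label
  if dwtCrit ll then (true, st.2)
  else if dwtBug ll then (st.1, true)
  else st

def detect_workflow_tier_alt (labels : List String) : Option String :=
  match dwtLookup labels with
  | some t => some t
  | none =>
    let st := labels.foldl dwtStep (false, false)
    if st.1 then some "fast-track"
    else if st.2 then some "shortened"
    else some "full"

-- ===== PRECONDITION & SPEC =====
def Spec_detect_workflow_tier (labels : List String) (out : Option String) : Prop := out = detect_workflow_tier_alt labels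
instance (labels : List String) (out : Option String) : Decidable (Spec_detect_workflow_tier labels out) := by unfold Spec_detect_workflow_tier; infer_instance

-- ===== CLAIM (what is proved, stated in full; the proofs are below) =====
def Claim_equal_detect_workflow_tier : Prop := ∀ (labels : List String), Dom_detect_workflow_tier labels → Spec_detect_workflow_tier labels (detect_workflow_tier labels)

-- ===== LEMMAS AND PROOFS =====

theorem dwtGet (label : String) : dwtExplicit.get? label =
    if label = "workflow:fast-track" then some "fast-track"
    else if label = "workflow:shortened" then some "shortened"
    else if label = "workflow:full" then some "full" else none := by
  simp [dwtExplicit, PySem.Dict.ofList, PySem.Dict.update, PySem.Dict.get?_insert]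

theorem dwtLookup_eq_phase1 (labels : List String) : dwtLookup labels = dwtPhase1 labels := by
  induction labels with
  | nil => rfl
  | cons label rest ih =>
    simp only [dwtLookup, dwtPhase1, dwtGet, ih]
    by_cases h1 : label = "workflow:full" <;>
      by_cases h2 : label = "workflow:shortened" <;>
        by_cases h3 : label = "workflow:fast-track" <;>
          simp_all

theorem dwtFoldl_flags (labels : List String) (a b : Bool) :
    labels.foldl dwtStep (a, b) =
      (a || (labels.map PySem.Str.lower).any dwtCrit,
       b || (labels.map PySem.Str.lower).any (fun l => !dwtCrit l && dwtBug l)) := by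
  induction labels generalizing a b with
  | nil => simp
  | cons h t ih =>
    simp only [List.foldl_cons, List.map_cons, List.any_cons, dwtStep]
    by_cases hc : dwtCrit (PySem.Str.lower h)
    · simp [hc, ih]
    · by_cases hb : dwtBug (PySem.Str.lower h)
      · simp [hc, hb, ih]
      · simp [hc, hb, ih]

theorem dwtAnyBug (ls : List String) (h : ls.any dwtCrit = false) :
    ls.any (fun l => !dwtCrit l && dwtBug l) = ls.any dwtBug := by
  induction ls with
  | nil => rfl
  | cons x xs ih =>
    simp only [List.any_cons, Bool.or_eq_false_iff] at h
    simp [h.1, ih h.2]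

-- ===== VERDICT (by name: the statement is the Claim_ definition above) =====
theorem detect_workflow_tier_spec : Claim_equal_detect_workflow_tier := by
  intro labels _
  unfold Spec_detect_workflow_tier detect_workflow_tier detect_workflow_tier_alt
  rw [dwtLookup_eq_phase1]
  cases hp : dwtPhase1 labels with
  | some t => rfl
  | none =>
    simp only [dwtFoldl_flags, Bool.false_or]
    by_cases hc : (labels.map PySem.Str.lower).any dwtCrit = true
    · simp [hc]
    · have hcf : (labels.map PySem.Str.lower).any dwtCrit = false := by
        simpa using hc
      by_cases h2 : (labels.map PySem.Str.lower).any dwtBug = true <;>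
        by_cases h3 : (labels.map PySem.Str.lower).any dwtFeat = true <;>
          simp [hcf, h2, h3, dwtAnyBug _ hcf]
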